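-- pv_equiv track=rewrite | github.com/yabincui/topcoder | ListeningIn.py | probableMatch
-- ===== SOURCE A (Python) =====
-- def probableMatch(typed, phrase):
-- 	removed = []
-- 	match = 0
-- 	for i in range(len(phrase)):
-- 		if typed[match] != phrase[i]:
-- 			removed.append(phrase[i])
-- 			continue
-- 		match += 1
-- 		if match == len(typed):
-- 			removed += phrase[i+1:]
-- 			break
-- 	if match != len(typed):
-- 		return 'UNMATCHED'
-- 	return ''.join(removed)
-- ===== SOURCE B (Python) =====
-- def probableMatch(typed, phrase):
--     removed = ''
--     pos = 0
--     for c in typed: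
--         j = phrase.find(c, pos)
--         if j == -1:
--             return 'UNMATCHED'
--         removed += phrase[pos:j]
--         pos = j + 1
--     return removed + phrase[pos:]
-- ===== Notes on version B (the rewrite author's own statement) =====
-- stated objective: idiomatic
-- what changed: B iterates over the characters of typed and jumps through phrase with str.find(c, pos), collecting whole removed slices, instead of A's per-character scan of phrase with a running match index into typed.
import Mathlib
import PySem

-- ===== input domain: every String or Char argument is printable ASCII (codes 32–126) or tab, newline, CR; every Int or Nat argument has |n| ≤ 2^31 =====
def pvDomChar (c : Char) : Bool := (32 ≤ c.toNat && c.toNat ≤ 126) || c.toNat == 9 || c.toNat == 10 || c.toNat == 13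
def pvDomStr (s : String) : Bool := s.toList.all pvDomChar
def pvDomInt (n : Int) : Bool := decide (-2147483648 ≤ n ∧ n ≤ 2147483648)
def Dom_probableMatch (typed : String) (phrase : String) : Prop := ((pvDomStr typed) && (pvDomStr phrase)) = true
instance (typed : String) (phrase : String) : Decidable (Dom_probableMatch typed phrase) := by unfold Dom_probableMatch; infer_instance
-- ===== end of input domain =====

-- B walks `typed` with str.find over `phrase` instead of A's per-character scan of `phrase`;
-- same return value wherever A returns (A raises IndexError when typed is empty and phrase is not — excluded by Pre_, B returns phrase there).


-- ===== PORT A =====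
-- A's loop over `phrase` with the running `match` index into `typed`; returns (removed, match).
-- `typed[match]` is ported with `tl[m]?`; the `none` case is Python's IndexError (outside Pre_).
def goA (tl : List Char) : List Char → List Char → Nat → (List Char × Nat)
  | [], removed, m => (removed, m)
  | p :: rest, removed, m =>
    match tl[m]? with
    | none => (removed, m)   -- IndexError in Python; unreachable under Pre_
    | some t =>
      if t ≠ p then goA tl rest (removed ++ [p]) m
      else if m + 1 = tl.length then (removed ++ rest, m + 1)
      else goA tl rest removed (m + 1)

def probableMatch (typed : String) (phrase : String) : String :=
  let tl := typed.toList
  let r := goA tl phrase.toList [] 0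
  if r.2 ≠ tl.length then "UNMATCHED" else String.ofList r.1

-- ===== PORT B =====
-- B's loop over `typed` with a cursor `pos` into `phrase`, using phrase.find(c, pos).
def goB (phrase : List Char) : List Char → Nat → List Char → Option (List Char)
  | [], pos, removed => some (removed ++ PySem.Chars.slice phrase (some (pos : Int)) none)
  | c :: cs, pos, removed =>
    let j := PySem.Chars.findFrom phrase [c] (pos : Int) none
    if j = -1 then none
    else goB phrase cs (j.toNat + 1) (removed ++ PySem.Chars.slice phrase (some (pos : Int)) (some j))

def probableMatch_alt (typed : String) (phrase : String) : String :=
  match goB phrase.toList typed.toList 0 [] with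
  | none => "UNMATCHED"
  | some r => String.ofList r

-- ===== PRECONDITION & SPEC =====
-- Pre_ excludes exactly the inputs where A raises IndexError: empty `typed` with non-empty `phrase`.
def Pre_probableMatch (typed : String) (phrase : String) : Prop :=
  typed = "" → phrase = ""
instance (typed : String) (phrase : String) : Decidable (Pre_probableMatch typed phrase) := by unfold Pre_probableMatch; infer_instance

def pvWitness_probableMatch : String × String := ("ac", "abc")

def Spec_probableMatch (typed : String) (phrase : String) (out : String) : Prop := out = probableMatch_alt typed phrase
instance (typed : String) (phrase : String) (out : String) : Decidable (Spec_probableMatch typed phrase out) := by unfold Spec_probableMatch; infer_instance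

-- ===== CLAIM (what is proved, stated in full; the proofs are below) =====
def Claim_equal_probableMatch : Prop := ∀ (typed : String) (phrase : String), Dom_probableMatch typed phrase → Pre_probableMatch typed phrase → Spec_probableMatch typed phrase (probableMatch typed phrase)

-- ===== LEMMAS AND PROOFS =====

-- Reference function: match ts as a subsequence of pl greedily; some (the removed chars) or none.
def spec : List Char → List Char → Option (List Char)
  | [], pl => some pl
  | _ :: _, [] => none
  | c :: cs, p :: pl => if p = c then spec cs pl else (spec (c :: cs) pl).map (p :: ·)

theorem goA_eq_spec (tl : List Char) :
    ∀ (pl : List Char) (removed : List Char) (m : Nat), m < tl.length →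
      (if (goA tl pl removed m).2 = tl.length then some (goA tl pl removed m).1 else none)
        = (spec (tl.drop m) pl).map (removed ++ ·) := by
  intro pl
  induction pl with
  | nil =>
    intro removed m hm
    rw [List.drop_eq_getElem_cons hm]
    simp only [goA, spec, Option.map_none]
    rw [if_neg (by omega)]
  | cons p rest ih =>
    intro removed m hm
    have hget : tl[m]? = some tl[m] := List.getElem?_eq_getElem hm
    rw [List.drop_eq_getElem_cons hm]
    by_cases hne : tl[m] = p
    · by_cases hlast : m + 1 = tl.length
      · simp [goA, hget, hne, hlast, spec]
      · have hlt : m + 1 < tl.length := by omega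
        have := ih removed (m+1) hlt
        simp only [goA, hget, hne, hlast, ite_false]
        simp only [spec]
        simpa using this
    · have h2 := ih (removed ++ [p]) m hm
      simp only [goA, hget, Ne, hne, not_false_iff, if_true]
      rw [h2, List.drop_eq_getElem_cons hm]
      simp only [spec]
      rw [if_neg (Ne.symm hne)]
      cases spec (tl[m] :: tl.drop (m + 1)) rest <;> simp

theorem spec_none (c : Char) (cs : List Char) :
    ∀ (l : List Char), c ∉ l → spec (c :: cs) l = none := by
  intro l
  induction l with
  | nil => intro _; rfl
  | cons p rest ih =>
    intro h
    simp only [List.mem_cons, not_or] at h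
    simp [spec, Ne.symm h.1, ih h.2]

theorem spec_cons_eq (c : Char) (cs : List Char) :
    ∀ (l : List Char) (j : Nat), l[j]? = some c → (∀ i < j, l[i]? ≠ some c) →
      spec (c :: cs) l = (spec cs (l.drop (j + 1))).map (l.take j ++ ·) := by
  intro l
  induction l with
  | nil => intro j hj; simp at hj
  | cons p rest ih =>
    intro j hj hmin
    cases j with
    | zero =>
      simp only [List.getElem?_cons_zero, Option.some.injEq] at hj
      subst hj
      simp only [spec, List.take_zero, List.drop_succ_cons, List.drop_zero]
      cases spec cs rest <;> simp
    | succ j' =>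
      have hp : p ≠ c := by
        have := hmin 0 (Nat.succ_pos _)
        simpa using this
      have hmin' : ∀ i < j', rest[i]? ≠ some c := by
        intro i hi
        have := hmin (i + 1) (by omega)
        simpa using this
      simp only [List.getElem?_cons_succ] at hj
      simp only [spec, if_neg hp, ih j' hj hmin', List.take_succ_cons, List.drop_succ_cons]
      cases spec cs (rest.drop (j' + 1)) <;> simp

theorem singleton_infix_iff (c : Char) (l : List Char) : [c] <:+: l ↔ c ∈ l := by
  constructor
  · intro h; exact h.subset (List.mem_singleton_self c)
  · intro h
    obtain ⟨s, t, rfl⟩ := List.append_of_mem h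
    exact ⟨s, t, by simp⟩

theorem singleton_prefix_iff (c : Char) (l : List Char) : [c] <+: l ↔ l[0]? = some c := by
  cases l with
  | nil => simp
  | cons x xs => simp [List.cons_prefix_cons, eq_comm]

theorem goB_eq_spec (pl : List Char) :
    ∀ (cs : List Char) (pos : Nat) (removed : List Char), pos ≤ pl.length →
      goB pl cs pos removed = (spec cs (pl.drop pos)).map (removed ++ ·) := by
  intro cs
  induction cs with
  | nil =>
    intro pos removed hpos
    simp [goB, spec, PySem.Chars.slice_eq_listSlice, PySem.List.slice_from_natCast]
  | cons c cs' ih =>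
    intro pos removed hpos
    have hff := PySem.Chars.findFrom_natCast pl [c] pos hpos
    by_cases hfind : PySem.Chars.find (pl.drop pos) [c] = -1
    · have hnone : spec (c :: cs') (pl.drop pos) = none := by
        apply spec_none
        rw [← singleton_infix_iff]
        exact (PySem.Chars.find_eq_neg_one_iff _ _).mp hfind
      simp [goB, hff, hfind, hnone]
    · set k := PySem.Chars.find (pl.drop pos) [c] with hk
      have hk0 : 0 ≤ k := by
        have := PySem.Chars.neg_one_le_find (pl.drop pos) [c]
        omega
      have hspec := PySem.Chars.find_spec (s := pl.drop pos) (sub := [c]) hk0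
      have hpre : [c] <+: (pl.drop pos).drop k.toNat := hspec.1
      have hne : (pl.drop pos).drop k.toNat ≠ [] := by
        rcases hpre with ⟨t, ht⟩
        rw [← ht]; simp
      have hkl' : pos + k.toNat + 1 ≤ pl.length := by
        have h1 : 0 < ((pl.drop pos).drop k.toNat).length := List.length_pos_of_ne_nil hne
        simp only [List.length_drop] at h1
        omega
      have hj : PySem.Chars.findFrom pl [c] (pos : Int) none = ((pos + k.toNat : Nat) : Int) := by
        rw [hff, if_neg hfind]
        push_cast
        omega
      have hget : (pl.drop pos)[k.toNat]? = some c := by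
        have h := (singleton_prefix_iff c _).mp hpre
        simp only [List.getElem?_drop, Nat.add_zero] at h
        rw [List.getElem?_drop]
        exact h
      have hmin : ∀ i < k.toNat, (pl.drop pos)[i]? ≠ some c := by
        intro i hi hic
        apply hspec.2 i hi
        rw [singleton_prefix_iff]
        simpa using hic
      have hslice : PySem.Chars.slice pl (some (pos : Int)) (some ((pos + k.toNat : Nat) : Int)) = (pl.drop pos).take k.toNat := by
        rw [PySem.Chars.slice_eq_listSlice, PySem.List.slice_natCast]
        congr 1
        omega
      have hdd : (pl.drop pos).drop (k.toNat + 1) = pl.drop (pos + k.toNat + 1) := by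
        rw [List.drop_drop]
        congr 1
      simp only [goB, hj]
      rw [if_neg (by omega), hslice]
      have htn : (((pos + k.toNat : Nat) : Int)).toNat = pos + k.toNat := by omega
      rw [htn, ih (pos + k.toNat + 1) _ hkl']
      rw [spec_cons_eq c cs' (pl.drop pos) k.toNat hget hmin, hdd]
      cases spec cs' (pl.drop (pos + k.toNat + 1)) <;> simp
  

-- ===== VERDICT (by name: the statement is the Claim_ definition above) =====
theorem probableMatch_spec : Claim_equal_probableMatch := by
  intro typed phrase _ hpre
  unfold Spec_probableMatch probableMatch probableMatch_alt
  by_cases ht : typed = ""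
  · subst ht
    rw [hpre rfl]
    rfl
  · have htl : typed.toList ≠ [] := by
      intro h
      exact ht (by simpa using congrArg String.ofList h)
    have hlen : 0 < typed.toList.length := List.length_pos_of_ne_nil htl
    have hA := goA_eq_spec typed.toList phrase.toList [] 0 hlen
    have hB := goB_eq_spec phrase.toList typed.toList 0 [] (Nat.zero_le _)
    simp only [List.drop_zero, List.nil_append, Option.map_id'] at hA hB
    cases hs : spec typed.toList phrase.toList with
    | none =>
      rw [hs] at hA hB
      rw [hB]
      have hcond : (goA typed.toList phrase.toList [] 0).2 ≠ typed.toList.length := by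
        intro h
        rw [if_pos h] at hA
        simp at hA
      rw [if_pos hcond]
    | some r =>
      rw [hs] at hA hB
      rw [hB]
      have hcond : (goA typed.toList phrase.toList [] 0).2 = typed.toList.length := by
        by_contra h
        rw [if_neg h] at hA
        simp at hA
      have hval : (goA typed.toList phrase.toList [] 0).1 = r := by
        rw [if_pos hcond] at hA
        simpa using hA
      rw [if_neg (not_not_intro hcond), hval]
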